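-- pv_equiv track=rewrite | github.com/palpant-comp/TRIAGE-Cluster | TRIAGE_Cluster.py | getBlacklist
-- ===== SOURCE A (Python) =====
-- def getBlacklist(blacklistthese):
-- 	out = []
-- 	if isinstance(blacklistthese, list):
-- 		for peak in blacklistthese:
-- 			levels = peak.split('_')
-- 			out = out + ['_'.join(levels[0:n]) for n in range(1, len(levels))]
-- 	else: # if there's only one peak in blacklistthese
-- 		levels = blacklistthese.split('_')
-- 		out = out + ['_'.join(levels[0:n]) for n in range(1,len(levels))]
-- 	return list(set(out))
-- ===== SOURCE B (Python) =====
-- def getBlacklist(blacklistthese):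
-- 	peaks = blacklistthese if isinstance(blacklistthese, list) else [blacklistthese]
-- 	found = set()
-- 	for peak in peaks:
-- 		for i, ch in enumerate(peak):
-- 			if ch == '_':
-- 				found.add(peak[:i])
-- 	return list(found)
-- ===== Notes on version B (the rewrite author's own statement) =====
-- stated objective: alternative
-- what changed: Instead of splitting each peak into '_'-separated levels and re-joining every proper prefix of the level list (building all prefixes as fresh joined strings and deduplicating a concatenated list at the end), B scans each peak once and for every underscore position i adds the slice peak[:i] directly into a set, never materialising the level list, the joins or the intermediate list.
import Mathlib
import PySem

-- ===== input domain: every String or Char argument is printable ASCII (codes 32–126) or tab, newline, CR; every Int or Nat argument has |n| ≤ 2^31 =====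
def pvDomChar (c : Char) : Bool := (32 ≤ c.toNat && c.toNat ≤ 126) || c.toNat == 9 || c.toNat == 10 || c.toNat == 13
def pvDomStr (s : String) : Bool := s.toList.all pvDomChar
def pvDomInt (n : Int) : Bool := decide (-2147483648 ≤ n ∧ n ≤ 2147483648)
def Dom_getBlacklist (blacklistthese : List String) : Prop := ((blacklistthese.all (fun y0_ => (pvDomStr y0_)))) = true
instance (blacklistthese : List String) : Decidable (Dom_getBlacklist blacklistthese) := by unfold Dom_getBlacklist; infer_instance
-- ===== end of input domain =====

-- B collects peak[:i] for every underscore position i by one scan per peak, directly into a set,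
-- instead of A's split-into-levels + re-join-every-prefix + dedup-at-the-end; same values, alternative algorithm.
-- Python's list(set(out)) iteration order is hash-based; both ports return the distinct elements
-- in first-occurrence order (PySem.Set), the equivalence is about that set of strings.

-- ===== PORT A =====
-- 'isinstance(blacklistthese, list)' is always true at type List String, so only the list branch is ported.
def getBlacklist (blacklistthese : List String) : List String :=
  let out : List String :=
    blacklistthese.foldl (fun out peak =>
      let levels := (PySem.Str.split? peak "_").getD []
      out ++ (PySem.List.pyRange 1 ((levels.length : Int)) 1).map
        (fun n => PySem.Str.join "_" (PySem.List.slice levels (some 0) (some n)))) []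
  PySem.Set.ofList out

-- ===== PORT B =====
def getBlacklist_alt (blacklistthese : List String) : List String :=
  blacklistthese.foldl (fun found peak =>
    (PySem.List.enumerate peak.toList 0).foldl (fun found p =>
      if p.2 == '_' then PySem.Set.add found (PySem.Str.slice peak none (some p.1)) else found)
      found) PySem.Set.empty

-- ===== PRECONDITION & SPEC =====
def Spec_getBlacklist (blacklistthese : List String) (out : List String) : Prop := out = getBlacklist_alt blacklistthese
instance (blacklistthese : List String) (out : List String) : Decidable (Spec_getBlacklist blacklistthese out) := by unfold Spec_getBlacklist; infer_instance

-- ===== CLAIM (what is proved, stated in full; the proofs are below) =====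
def Claim_equal_getBlacklist : Prop := ∀ (blacklistthese : List String), Dom_getBlacklist blacklistthese → Spec_getBlacklist blacklistthese (getBlacklist blacklistthese)

-- ===== LEMMAS AND PROOFS =====

-- spec-side split of a char list at underscores (what splitOn computes for sep "_")
def splitU : List Char → List (List Char)
  | [] => [[]]
  | c :: rest => if c = '_' then [] :: splitU rest else (splitU rest).modifyHead (c :: ·)

-- the prefixes cut at each underscore position, in order of position
def prefU : List Char → List (List Char)
  | [] => []
  | c :: rest => (if c = '_' then [[]] else []) ++ (prefU rest).map (c :: ·)

theorem splitU_ne_nil (cs : List Char) : splitU cs ≠ [] := by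
  cases cs with
  | nil => simp [splitU]
  | cons c rest =>
    simp only [splitU]
    split_ifs
    · simp
    · cases h : splitU rest with
      | nil => exact absurd h (splitU_ne_nil rest)
      | cons a t => simp

theorem splitOn_go_eq (fuel : Nat) (l cur : List Char) (acc : List (List Char))
    (h : l.length ≤ fuel) :
    PySem.Chars.splitOn.go ['_'] fuel l cur acc
      = acc.reverse ++ (splitU l).modifyHead (cur.reverse ++ ·) := by
  induction fuel generalizing l cur acc with
  | zero =>
    have hl : l = [] := List.eq_nil_of_length_eq_zero (Nat.le_zero.mp h)
    subst hl
    rw [PySem.Chars.splitOn.go]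
    simp [splitU]
  | succ f ih =>
    cases l with
    | nil =>
      rw [PySem.Chars.splitOn.go]
      · simp [splitU]
      · omega
    | cons c rest =>
      rw [PySem.Chars.splitOn.go]
      by_cases hc : c = '_'
      · subst hc
        rw [if_pos (by simp [List.isPrefixOf])]
        rw [ih _ _ _ (by simpa using Nat.le_of_succ_le_succ h)]
        cases hS : splitU rest with
        | nil => exact absurd hS (splitU_ne_nil rest)
        | cons a t => simp [splitU, hS]
      · rw [if_neg (by simp [List.isPrefixOf]; exact fun h' => hc h'.symm)]
        rw [ih _ _ _ (by simpa using Nat.le_of_succ_le_succ h)]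
        cases hS : splitU rest with
        | nil => exact absurd hS (splitU_ne_nil rest)
        | cons a t => simp [splitU, hc, hS]

theorem splitOn_eq_splitU (cs : List Char) : PySem.Chars.splitOn cs ['_'] = splitU cs := by
  unfold PySem.Chars.splitOn
  rw [splitOn_go_eq _ _ _ _ (by omega)]
  cases hS : splitU cs with
  | nil => exact absurd hS (splitU_ne_nil cs)
  | cons a t => simp

-- one element of '_'.join: joining a list whose head starts with c pulls c out front
-- joining a list whose head starts with c pulls c out front
theorem join_cons_char (sep : List Char) (c : Char) (x : List Char) (l : List (List Char)) :
    PySem.Chars.join sep ((c :: x) :: l) = c :: PySem.Chars.join sep (x :: l) := by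
  cases l with
  | nil => simp [PySem.Chars.join_singleton]
  | cons y t => simp [PySem.Chars.join_cons_cons]

-- joining with an empty head part emits the separator
theorem join_nil_cons (sep : List Char) (x : List Char) (l : List (List Char)) :
    PySem.Chars.join sep ([] :: x :: l) = sep ++ PySem.Chars.join sep (x :: l) := by
  rw [PySem.Chars.join_cons_cons]
  simp

-- A's per-peak comprehension, on chars
theorem joinsA_eq_prefU (cs : List Char) :
    (List.range ((splitU cs).length - 1)).map
        (fun k => PySem.Chars.join ['_'] ((splitU cs).take (k + 1))) = prefU cs := by
  induction cs with
  | nil => simp [splitU, prefU]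
  | cons c rest ih =>
    cases hS : splitU rest with
    | nil => exact absurd hS (splitU_ne_nil rest)
    | cons a t =>
      by_cases hc : c = '_'
      · subst hc
        have hsp : splitU ('_' :: rest) = [] :: a :: t := by simp [splitU, hS]
        have hpr : prefU ('_' :: rest) = [] :: (prefU rest).map ('_' :: ·) := by
          simp [prefU]
        rw [hsp, hpr]
        have hlen : ([] :: a :: t).length - 1 = t.length + 1 := by simp
        rw [hlen, List.range_succ_eq_map, List.map_cons, List.map_map]
        refine congrArg₂ List.cons ?_ ?_
        · simp [PySem.Chars.join_singleton]
        · rw [← ih, hS, List.map_map]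
          apply List.map_congr_left
          intro k _
          show PySem.Chars.join ['_'] (List.take (k.succ + 1) ([] :: a :: t))
             = '_' :: PySem.Chars.join ['_'] (List.take (k + 1) (a :: t))
          rw [List.take_succ_cons, List.take_succ_cons, join_nil_cons]
          simp
      · have hsp : splitU (c :: rest) = (c :: a) :: t := by simp [splitU, hc, hS]
        have hpr : prefU (c :: rest) = (prefU rest).map (c :: ·) := by
          simp [prefU, hc]
        rw [hsp, hpr, ← ih, hS, List.map_map]
        have hlen : ((c :: a) :: t).length - 1 = (a :: t).length - 1 := by simp
        rw [hlen]
        apply List.map_congr_left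
        intro k _
        show PySem.Chars.join ['_'] (List.take (k + 1) ((c :: a) :: t))
           = c :: PySem.Chars.join ['_'] (List.take (k + 1) (a :: t))
        rw [List.take_succ_cons, List.take_succ_cons, join_cons_char]

theorem enumerate_shift (cs : List Char) (s : Int) :
    PySem.List.enumerate cs (s + 1) = (PySem.List.enumerate cs s).map (fun p => (p.1 + 1, p.2)) := by
  induction cs generalizing s with
  | nil => simp [PySem.List.enumerate_nil]
  | cons c t ih => simp [PySem.List.enumerate_cons, ih]

-- B's per-peak scan, on chars
-- B's per-peak scan, on chars
theorem scanB_eq_prefU (cs : List Char) :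
    ((PySem.List.enumerate cs 0).filter (fun p => p.2 == '_')).map
        (fun p => cs.take p.1.toNat) = prefU cs := by
  induction cs with
  | nil => simp [prefU, PySem.List.enumerate]
  | cons c rest ih =>
    rw [PySem.List.enumerate_cons, enumerate_shift, List.filter_cons]
    have key : List.map (fun p => List.take p.1.toNat (c :: rest))
        (List.filter (fun p => p.2 == '_')
          ((PySem.List.enumerate rest 0).map (fun p => (p.1 + 1, p.2))))
        = List.map (fun x => c :: x) (prefU rest) := by
      rw [List.filter_map, ← ih, List.map_map, List.map_map]
      simp only [Function.comp_def]
      apply List.map_congr_left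
      intro p hp
      obtain ⟨k, hk, rfl⟩ := (PySem.List.mem_enumerate_iff _ _ _).mp (List.mem_of_mem_filter hp)
      have h1 : ((0 : Int) + k + 1).toNat = k + 1 := by omega
      have h2 : ((0 : Int) + k).toNat = k := by omega
      simp only [h1, h2, List.take_succ_cons]
    by_cases hc : c = '_'
    · subst hc
      rw [if_pos (by simp)]
      have hpr : prefU ('_' :: rest) = [] :: (prefU rest).map ('_' :: ·) := by simp [prefU]
      rw [hpr, List.map_cons, key]
      simp
    · rw [if_neg (by simp [hc])]
      have hpr : prefU (c :: rest) = (prefU rest).map (c :: ·) := by simp [prefU, hc]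
      rw [hpr, key]

-- A's per-peak list of strings
def LAs (peak : String) : List String :=
  let levels := (PySem.Str.split? peak "_").getD []
  (PySem.List.pyRange 1 ((levels.length : Int)) 1).map
    (fun n => PySem.Str.join "_" (PySem.List.slice levels (some 0) (some n)))

-- B's per-peak list of strings (the values added, in scan order)
def LBs (peak : String) : List String :=
  ((PySem.List.enumerate peak.toList 0).filter (fun p => p.2 == '_')).map
    (fun p => PySem.Str.slice peak none (some p.1))

theorem LAs_eq (peak : String) : LAs peak = (prefU peak.toList).map String.ofList := by
  unfold LAs
  have hsep : ("_" : String).toList = ['_'] := rfl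
  have hsplit : (PySem.Str.split? peak "_").getD [] = (splitU peak.toList).map String.ofList := by
    simp [PySem.Str.split?, PySem.Chars.split?, hsep, splitOn_eq_splitU]
  rw [hsplit]
  show (PySem.List.pyRange 1 (((List.map String.ofList (splitU peak.toList)).length : Int)) 1).map
      (fun n => PySem.Str.join "_" (PySem.List.slice (List.map String.ofList (splitU peak.toList))
        (some 0) (some n)))
    = List.map String.ofList (prefU peak.toList)
  rw [List.length_map, PySem.List.pyRange_one]
  have hlen : (((splitU peak.toList).length : Int) - 1).toNat = (splitU peak.toList).length - 1 := by
    omega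
  rw [hlen, List.map_map, ← joinsA_eq_prefU peak.toList, List.map_map]
  apply List.map_congr_left
  intro k _
  show PySem.Str.join "_" (PySem.List.slice ((splitU peak.toList).map String.ofList)
        (some 0) (some (1 + (k : Int))))
     = String.ofList (PySem.Chars.join ['_'] ((splitU peak.toList).take (k + 1)))
  have h1 : (1 + (k : Int)) = (((k + 1 : Nat)) : Int) := by push_cast; ring
  rw [h1, PySem.List.slice_zero_start, PySem.List.slice_to_natCast, ← List.map_take]
  simp [PySem.Str.join, hsep, Function.comp_def, String.toList_ofList]

theorem LBs_eq (peak : String) : LBs peak = (prefU peak.toList).map String.ofList := by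
  unfold LBs
  rw [← scanB_eq_prefU peak.toList, List.map_map]
  apply List.map_congr_left
  intro p hp
  obtain ⟨k, hk, rfl⟩ := (PySem.List.mem_enumerate_iff _ _ _).mp (List.mem_of_mem_filter hp)
  show PySem.Str.slice peak none (some ((0 : Int) + k))
     = String.ofList (peak.toList.take ((0 : Int) + (k : Int)).toNat)
  have h0 : ((0 : Int) + (k : Int)) = ((k : Nat) : Int) := by omega
  rw [h0]
  simp [PySem.Str.slice, PySem.List.slice_to_natCast]

-- a conditional-add loop over any list is a Set.update with the filtered, mapped values
theorem foldl_addIf (f : Int × Char → String) (l : List (Int × Char)) (st : PySem.Set String) :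
    l.foldl (fun found p => if p.2 == '_' then PySem.Set.add found (f p) else found) st
      = PySem.Set.update st ((l.filter (fun p => p.2 == '_')).map f) := by
  induction l generalizing st with
  | nil => simp [PySem.Set.update]
  | cons p t ih =>
    rw [List.foldl_cons, List.filter_cons]
    by_cases hp : (p.2 == '_') = true
    · rw [if_pos hp, if_pos hp, ih]
      simp [PySem.Set.update]
    · rw [if_neg hp, if_neg hp, ih]

theorem inner_foldl_eq_update (peak : String) (st : PySem.Set String) :
    (PySem.List.enumerate peak.toList 0).foldl (fun found p =>
      if p.2 == '_' then PySem.Set.add found (PySem.Str.slice peak none (some p.1)) else found) st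
      = PySem.Set.update st (LBs peak) := by
  unfold LBs
  exact foldl_addIf _ _ _

theorem foldl_update_eq_update_flatMap (g : String → List String) (bs : List String)
    (st : PySem.Set String) :
    bs.foldl (fun st p => PySem.Set.update st (g p)) st = PySem.Set.update st (bs.flatMap g) := by
  induction bs generalizing st with
  | nil => simp [PySem.Set.update]
  | cons b t ih =>
    rw [List.foldl_cons, ih]
    simp [PySem.Set.update, List.foldl_append]

-- ===== VERDICT (by name: the statement is the Claim_ definition above) =====
theorem getBlacklist_spec : Claim_equal_getBlacklist := by
  unfold Claim_equal_getBlacklist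
  intro bs _
  unfold Spec_getBlacklist getBlacklist getBlacklist_alt
  show PySem.Set.ofList (bs.foldl (fun out peak => out ++ LAs peak) [])
     = bs.foldl (fun found peak =>
        (PySem.List.enumerate peak.toList 0).foldl (fun found p =>
          if p.2 == '_' then PySem.Set.add found (PySem.Str.slice peak none (some p.1)) else found)
          found) PySem.Set.empty
  have hB : (fun (found : PySem.Set String) (peak : String) =>
        (PySem.List.enumerate peak.toList 0).foldl (fun found p =>
          if p.2 == '_' then PySem.Set.add found (PySem.Str.slice peak none (some p.1)) else found)
          found)
      = fun found peak => PySem.Set.update found (LBs peak) := by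
    funext st peak
    exact inner_foldl_eq_update peak st
  rw [hB, foldl_update_eq_update_flatMap, PySem.List.foldl_append_eq_flatMap]
  have hfun : LAs = LBs := funext fun p => (LAs_eq p).trans (LBs_eq p).symm
  rw [hfun]
  rfl
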